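-- pv_equiv track=rewrite | github.com/Turazhanova/iiiii | ident.py | classify_numbers
-- ===== SOURCE A (Python) =====
-- def classify_numbers(numbers):
--     inn = None
--     id_number = None
--     for number in numbers:
--         if len(number) == 12:
--             inn = number
--         elif len(number) == 9:
--             id_number = number
--     return inn, id_number
-- ===== SOURCE B (Python) =====
-- def classify_numbers(numbers):
--     inn = None
--     id_number = None
--     for number in reversed(numbers):
--         if inn is None and len(number) == 12:
--             inn = number
--         if id_number is None and len(number) == 9:
--             id_number = number
--         if inn is not None and id_number is not None:
--             break
--     return inn, id_number
-- ===== Notes on version B (the rewrite author's own statement) =====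
-- stated objective: idiomatic
-- what changed: B scans the list from the end, keeping the first length-12 and length-9 strings it meets and breaking once both are found, instead of A's forward pass that keeps overwriting both slots.
import Mathlib
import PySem

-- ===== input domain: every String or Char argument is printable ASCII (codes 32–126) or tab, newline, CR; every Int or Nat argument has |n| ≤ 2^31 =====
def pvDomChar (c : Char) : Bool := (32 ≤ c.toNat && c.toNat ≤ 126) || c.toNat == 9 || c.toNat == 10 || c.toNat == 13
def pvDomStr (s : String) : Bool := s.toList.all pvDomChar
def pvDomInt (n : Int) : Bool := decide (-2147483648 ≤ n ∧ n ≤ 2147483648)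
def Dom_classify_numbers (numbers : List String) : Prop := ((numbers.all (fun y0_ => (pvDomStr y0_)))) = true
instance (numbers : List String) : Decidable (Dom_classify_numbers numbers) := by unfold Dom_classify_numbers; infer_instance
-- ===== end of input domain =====

-- B scans from the end with early exit instead of A's overwriting forward pass; objective: idiomatic.

-- ===== PORT A =====
-- forward loop, overwriting the slots on every match
def classify_numbers (numbers : List String) : Option String × Option String :=
  numbers.foldl
    (fun (s : Option String × Option String) number =>
      if PySem.Str.len number = 12 then (some number, s.2)
      else if PySem.Str.len number = 9 then (s.1, some number)
      else s)
    (none, none)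

-- ===== PORT B =====
-- reverse loop, filling empty slots only, breaking once both are filled
def classify_numbers_altGo : List String → Option String → Option String → Option String × Option String
  | [], inn, idn => (inn, idn)
  | number :: rest, inn, idn =>
    let inn' := if inn = none ∧ PySem.Str.len number = 12 then some number else inn
    let idn' := if idn = none ∧ PySem.Str.len number = 9 then some number else idn
    if inn'.isSome ∧ idn'.isSome then (inn', idn')
    else classify_numbers_altGo rest inn' idn'

def classify_numbers_alt (numbers : List String) : Option String × Option String :=
  classify_numbers_altGo numbers.reverse none none

-- ===== PRECONDITION & SPEC =====
def Spec_classify_numbers (numbers : List String) (out : Option String × Option String) : Prop := out = classify_numbers_alt numbers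
instance (numbers : List String) (out : Option String × Option String) : Decidable (Spec_classify_numbers numbers out) := by unfold Spec_classify_numbers; infer_instance

-- ===== CLAIM (what is proved, stated in full; the proofs are below) =====
def Claim_equal_classify_numbers : Prop := ∀ (numbers : List String), Dom_classify_numbers numbers → Spec_classify_numbers numbers (classify_numbers numbers)

-- ===== LEMMAS AND PROOFS =====

-- B's loop fills an empty slot with the first match in its traversal order.
theorem altGo_eq_find (ys : List String) : ∀ (inn idn : Option String),
    classify_numbers_altGo ys inn idn =
      (inn.or (ys.find? (fun n => PySem.Str.len n == 12)),
       idn.or (ys.find? (fun n => PySem.Str.len n == 9))) := by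
  induction ys with
  | nil => intro inn idn; simp [classify_numbers_altGo]
  | cons n rest ih =>
    intro inn idn
    simp only [classify_numbers_altGo, List.find?]
    by_cases h12 : (n.length : Int) = 12 <;> by_cases h9 : (n.length : Int) = 9 <;>
      cases inn <;> cases idn <;>
      · (try (exfalso; omega))
        all_goals simp [h12, h9, ih, Option.or] <;> (try (split <;> simp_all)) <;> (try (split <;> simp_all))

-- A's loop ends with the last match, i.e. the first match of the reversed list.
theorem foldA_eq_find (xs : List String) : ∀ (s : Option String × Option String),
    xs.foldl
      (fun (s : Option String × Option String) number =>
        if PySem.Str.len number = 12 then (some number, s.2)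
        else if PySem.Str.len number = 9 then (s.1, some number)
        else s) s =
      ((xs.reverse.find? (fun n => PySem.Str.len n == 12)).or s.1,
       (xs.reverse.find? (fun n => PySem.Str.len n == 9)).or s.2) := by
  induction xs with
  | nil => intro s; simp
  | cons n rest ih =>
    intro s
    simp only [List.foldl_cons, List.reverse_cons, List.find?_append, ih]
    by_cases h12 : (n.length : Int) = 12 <;> by_cases h9 : (n.length : Int) = 9 <;>
      simp [h12, h9]

-- ===== VERDICT (by name: the statement is the Claim_ definition above) =====
theorem classify_numbers_spec : Claim_equal_classify_numbers := by
  intro numbers _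
  unfold Spec_classify_numbers classify_numbers classify_numbers_alt
  rw [foldA_eq_find, altGo_eq_find]
  simp
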